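-- pv_equiv track=rewrite | github.com/hyeonminmo/DCFuzz-1114 | docker/benchmark/dominator/script/extract_dominator.py | find_call_chain_to_target
-- ===== SOURCE A (Python) =====
-- from collections import defaultdict, deque
--
-- def find_call_chain_to_target(reverse_cg, target_func, preferred_roots=None):
--     """
--     Find one caller chain from a preferred root (e.g. main) to target_func.
--     If no preferred root is found, still return the longest discovered caller chain.
--     Returns list of functions: [root_or_topmost, ..., target_func]
--     """
--     if preferred_roots is None:
--         preferred_roots = ["main"]
--
--     q = deque([target_func])
--     prev = {target_func: None}
--     depth = {target_func: 0}
--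
--     found_root = None
--     farthest = target_func
--
--     while q:
--         cur = q.popleft()
--
--         if cur in preferred_roots:
--             found_root = cur
--             break
--
--         for caller in reverse_cg.get(cur, []):
--             if caller not in prev:
--                 prev[caller] = cur
--                 depth[caller] = depth[cur] + 1
--                 q.append(caller)
--
--                 if depth[caller] > depth[farthest]:
--                     farthest = caller
--
--     def rebuild_chain(start):
--         chain = [start]
--         cur = start
--         while cur != target_func:
--             cur = prev[cur]
--             chain.append(cur)
--         return chain
--
--     if found_root is not None:
--         return rebuild_chain(found_root)
--
--     if farthest != target_func:
--         return rebuild_chain(farthest)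
--
--     return [target_func]
-- ===== SOURCE B (Python) =====
-- from collections import deque
--
-- def find_call_chain_to_target(reverse_cg, target_func, preferred_roots=None):
--     """Path-carrying BFS: the queue stores whole chains [cur, ..., target_func],
--     so the prev/depth dicts and the rebuild_chain walk disappear."""
--     if preferred_roots is None:
--         preferred_roots = ["main"]
--     q = deque([[target_func]])
--     visited = {target_func}
--     farthest_path = [target_func]
--     while q:
--         p = q.popleft()
--         cur = p[0]
--         if cur in preferred_roots:
--             return p
--         for caller in reverse_cg.get(cur, []):
--             if caller not in visited:
--                 np = [caller] + p
--                 if len(np) > len(farthest_path):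
--                     farthest_path = np
--                 q.append(np)
--                 visited.add(caller)
--     return farthest_path
-- ===== Notes on version B (the rewrite author's own statement) =====
-- stated objective: simpler
-- what changed: The queue stores whole partial chains [cur, ..., target] instead of single nodes, so the prev/depth parent-pointer dicts and the rebuild_chain back-walk are removed entirely; the popped or farthest path is returned directly.
import Mathlib
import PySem

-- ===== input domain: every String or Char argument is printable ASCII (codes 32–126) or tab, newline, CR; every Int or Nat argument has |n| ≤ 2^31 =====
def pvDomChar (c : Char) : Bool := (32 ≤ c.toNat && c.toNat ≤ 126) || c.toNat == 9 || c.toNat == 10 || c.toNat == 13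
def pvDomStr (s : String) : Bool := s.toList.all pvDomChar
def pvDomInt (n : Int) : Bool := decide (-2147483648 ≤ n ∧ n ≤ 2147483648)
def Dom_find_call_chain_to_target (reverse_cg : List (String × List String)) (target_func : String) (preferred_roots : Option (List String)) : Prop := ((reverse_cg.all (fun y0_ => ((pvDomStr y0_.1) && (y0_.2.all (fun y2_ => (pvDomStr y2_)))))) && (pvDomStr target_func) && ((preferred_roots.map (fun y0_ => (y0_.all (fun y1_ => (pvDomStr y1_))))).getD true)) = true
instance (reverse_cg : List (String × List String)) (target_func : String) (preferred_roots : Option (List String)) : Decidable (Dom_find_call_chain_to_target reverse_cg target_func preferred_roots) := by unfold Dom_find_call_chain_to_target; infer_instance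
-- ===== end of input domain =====

-- B replaces A's prev/depth parent-pointer BFS by a path-carrying BFS (the queue stores whole
-- chains), removing the prev/depth dicts and the rebuild_chain walk; objective: simpler, not faster.

-- ===== PORT A =====
-- reverse_cg.get(cur, []) — dict lookup, first match on the association list
def pvCgGet (rcg : List (String × List String)) (k : String) : List String :=
  (PySem.Dict.mk rcg).getD k []

-- rebuild_chain: chain = [start]; while cur != target: cur = prev[cur]; chain.append(cur)
-- (fuel only makes the while-loop structurally recursive; prev[cur] is always present and
-- non-None when reached, so the extra branches are unreachable guards)
def pvRebuild (prev : PySem.Dict String (Option String)) (target_func : String) :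
    Nat → String → List String → List String
  | 0, _, chain => chain
  | fuel+1, cur, chain =>
    if cur = target_func then chain
    else
      match prev.getD cur none with
      | some c => pvRebuild prev target_func fuel c (chain ++ [c])
      | none => chain

-- post-loop: if farthest != target: return rebuild_chain(farthest); return [target]
def pvFinishA (prev : PySem.Dict String (Option String)) (target_func far : String) : List String :=
  if far ≠ target_func then pvRebuild prev target_func prev.size far [far] else [target_func]

-- the inner 'for caller in reverse_cg.get(cur, [])' loop
def pvInnerA (cur : String) :
    List String → List String → PySem.Dict String (Option String) → PySem.Dict String Int → String →
    List String × PySem.Dict String (Option String) × PySem.Dict String Int × String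
  | [], q, prev, depth, far => (q, prev, depth, far)
  | caller :: rest, q, prev, depth, far =>
    if (prev.get? caller).isSome then pvInnerA cur rest q prev depth far
    else
      let prev' := prev.insert caller (some cur)
      let depth' := depth.insert caller (depth.getD cur 0 + 1)
      let far' := if depth'.getD caller 0 > depth'.getD far 0 then caller else far
      pvInnerA cur rest (q ++ [caller]) prev' depth' far'

-- the 'while q' loop (fuel bounds the number of pops; it never runs out in practice)
def pvLoopA (rcg : List (String × List String)) (target_func : String) (roots : List String) :
    Nat → List String → PySem.Dict String (Option String) → PySem.Dict String Int → String → List String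
  | 0, _, prev, _, far => pvFinishA prev target_func far
  | fuel+1, q, prev, depth, far =>
    match q with
    | [] => pvFinishA prev target_func far
    | cur :: qs =>
      if roots.contains cur then pvRebuild prev target_func prev.size cur [cur]
      else
        let r := pvInnerA cur (pvCgGet rcg cur) qs prev depth far
        pvLoopA rcg target_func roots fuel r.1 r.2.1 r.2.2.1 r.2.2.2

def find_call_chain_to_target (reverse_cg : List (String × List String)) (target_func : String) (preferred_roots : Option (List String)) : List String :=
  let roots := preferred_roots.getD ["main"]
  pvLoopA reverse_cg target_func roots (1 + (reverse_cg.map (fun p => p.2.length)).sum)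
    [target_func]
    ((PySem.Dict.empty : PySem.Dict String (Option String)).insert target_func none)
    ((PySem.Dict.empty : PySem.Dict String Int).insert target_func 0)
    target_func

-- ===== PORT B =====
def pvInnerB :
    List String → List String → List (List String) → PySem.Set String → List String →
    List (List String) × PySem.Set String × List String
  | [], _, q, v, fp => (q, v, fp)
  | c :: rest, p, q, v, fp =>
    if PySem.Set.contains v c then pvInnerB rest p q v fp
    else
      let np := c :: p
      let fp' := if np.length > fp.length then np else fp
      pvInnerB rest p (q ++ [np]) (PySem.Set.add v c) fp'

def pvLoopB (rcg : List (String × List String)) (roots : List String) :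
    Nat → List (List String) → PySem.Set String → List String → List String
  | 0, _, _, fp => fp
  | fuel+1, q, v, fp =>
    match q with
    | [] => fp
    | p :: qs =>
      let cur := p.headD ""
      if roots.contains cur then p
      else
        let r := pvInnerB (pvCgGet rcg cur) p qs v fp
        pvLoopB rcg roots fuel r.1 r.2.1 r.2.2

def find_call_chain_to_target_alt (reverse_cg : List (String × List String)) (target_func : String) (preferred_roots : Option (List String)) : List String :=
  let roots := preferred_roots.getD ["main"]
  pvLoopB reverse_cg roots (1 + (reverse_cg.map (fun p => p.2.length)).sum)
    [[target_func]] (PySem.Set.ofList [target_func]) [target_func]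

-- ===== PRECONDITION & SPEC =====
def Spec_find_call_chain_to_target (reverse_cg : List (String × List String)) (target_func : String) (preferred_roots : Option (List String)) (out : List String) : Prop := out = find_call_chain_to_target_alt reverse_cg target_func preferred_roots
instance (reverse_cg : List (String × List String)) (target_func : String) (preferred_roots : Option (List String)) (out : List String) : Decidable (Spec_find_call_chain_to_target reverse_cg target_func preferred_roots out) := by unfold Spec_find_call_chain_to_target; infer_instance

-- ===== CLAIM (what is proved, stated in full; the proofs are below) =====
def Claim_equal_find_call_chain_to_target : Prop := ∀ (reverse_cg : List (String × List String)) (target_func : String) (preferred_roots : Option (List String)), Dom_find_call_chain_to_target reverse_cg target_func preferred_roots → Spec_find_call_chain_to_target reverse_cg target_func preferred_roots (find_call_chain_to_target reverse_cg target_func preferred_roots)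

-- ===== LEMMAS AND PROOFS =====

-- p is a prev-pointer chain ending at target_func: consecutive prev links, inner nodes ≠ target
def ChainP (prev : PySem.Dict String (Option String)) (t : String) : List String → Prop
  | [] => False
  | [c] => c = t ∧ prev.get? c = some none
  | c :: d :: rest => c ≠ t ∧ prev.get? c = some (some d) ∧ ChainP prev t (d :: rest)

-- the joint well-formedness of a queued path with respect to A's prev/depth maps
def GoodP (prev : PySem.Dict String (Option String)) (depth : PySem.Dict String Int)
    (t : String) (p : List String) : Prop :=
  ChainP prev t p ∧ p.Nodup ∧ depth.get? (p.headD "") = some ((p.length : Int) - 1)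

lemma chainP_mem_isSome {prev : PySem.Dict String (Option String)} {t : String} :
    ∀ {p : List String}, ChainP prev t p → ∀ x ∈ p, (prev.get? x).isSome := by
  intro p
  induction p with
  | nil => intro h; cases h
  | cons a q ih =>
    intro h x hx
    cases q with
    | nil =>
      obtain ⟨_, ha⟩ := h
      simp only [List.mem_singleton] at hx
      subst hx; simp [ha]
    | cons b rest =>
      obtain ⟨_, ha, hc⟩ := h
      rcases List.mem_cons.mp hx with rfl | hx
      · simp [ha]
      · exact ih hc x hx

lemma chainP_target_mem {prev : PySem.Dict String (Option String)} {t : String} :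
    ∀ {p : List String}, ChainP prev t p → t ∈ p := by
  intro p
  induction p with
  | nil => intro h; cases h
  | cons a q ih =>
    intro h
    cases q with
    | nil => obtain ⟨rfl, _⟩ := h; simp
    | cons b rest => exact List.mem_cons_of_mem _ (ih h.2.2)

lemma chainP_insert {prev : PySem.Dict String (Option String)} {t c : String}
    {v : Option String} (hc : prev.get? c = none) :
    ∀ {p : List String}, ChainP prev t p → ChainP (prev.insert c v) t p := by
  intro p
  induction p with
  | nil => intro h; cases h
  | cons a q ih =>
    intro h
    cases q with
    | nil =>
      obtain ⟨rfl, ha⟩ := h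
      refine ⟨rfl, ?_⟩
      rw [PySem.Dict.get?_insert_of_ne prev v (by intro hEq; rw [hEq, hc] at ha; cases ha)]
      exact ha
    | cons b rest =>
      obtain ⟨hat, ha, hrest⟩ := h
      refine ⟨hat, ?_, ih hrest⟩
      rw [PySem.Dict.get?_insert_of_ne prev v (by intro hEq; rw [hEq, hc] at ha; cases ha)]
      exact ha

lemma rebuild_of_chainP {prev : PySem.Dict String (Option String)} {t : String} :
    ∀ {p' : List String} {c : String}, ChainP prev t (c :: p') →
      ∀ fuel, p'.length ≤ fuel → ∀ acc, pvRebuild prev t fuel c acc = acc ++ p' := by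
  intro p'
  induction p' with
  | nil =>
    intro c h fuel _ acc
    obtain ⟨rfl, _⟩ := h
    cases fuel <;> simp [pvRebuild]
  | cons d rest ih =>
    intro c h fuel hf acc
    obtain ⟨hct, hc, hrest⟩ := h
    cases fuel with
    | zero => simp at hf
    | succ m =>
      have hd : prev.getD c none = some d := PySem.Dict.getD_of_get?_eq_some prev none hc
      simp only [pvRebuild, if_neg hct, hd]
      rw [ih hrest m (by simpa using hf) (acc ++ [d])]
      simp

lemma chainP_length_le_size {prev : PySem.Dict String (Option String)} {t : String}
    {p : List String} (h : ChainP prev t p) (hnd : p.Nodup) :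
    p.length ≤ prev.size := by
  have hsub : p ⊆ prev.keys := by
    intro x hx
    have := chainP_mem_isSome h x hx
    by_contra hmem
    rw [(PySem.Dict.get?_eq_none_iff_not_mem_keys prev x).mpr hmem] at this
    cases this
  calc p.length ≤ prev.keys.length := List.Subperm.length_le (List.subperm_of_subset hnd hsub)
    _ = prev.size := by simp [PySem.Dict.keys, PySem.Dict.size]

lemma finish_eq {prev : PySem.Dict String (Option String)} {depth : PySem.Dict String Int}
    {t far : String} {fp : List String} (hg : GoodP prev depth t fp)
    (hfar : far = fp.headD "") :
    pvFinishA prev t far = fp := by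
  obtain ⟨hchain, hnd, _⟩ := hg
  cases fp with
  | nil => cases hchain
  | cons c p' =>
    simp only [List.headD_cons] at hfar
    unfold pvFinishA
    rw [hfar]
    by_cases hct : c = t
    · subst hct
      cases p' with
      | nil => simp
      | cons d rest => exact absurd rfl hchain.1
    · rw [if_pos hct]
      have hlen : p'.length ≤ prev.size := by
        have := chainP_length_le_size hchain hnd
        simp at this; omega
      rw [rebuild_of_chainP hchain prev.size hlen [c]]
      simp

lemma inner_sim (t : String) :
    ∀ (callers : List String) (p : List String) (qB : List (List String))
      (prev : PySem.Dict String (Option String)) (depth : PySem.Dict String Int)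
      (vis : PySem.Set String) (far : String) (fp : List String),
      prev.keys.Nodup →
      (∀ q ∈ qB, GoodP prev depth t q) →
      GoodP prev depth t fp →
      far = fp.headD "" →
      (∀ s, vis.contains s = (prev.get? s).isSome) →
      GoodP prev depth t p →
      (pvInnerA (p.headD "") callers (qB.map (fun q => q.headD "")) prev depth far).1
          = (pvInnerB callers p qB vis fp).1.map (fun q => q.headD "") ∧
      (pvInnerA (p.headD "") callers (qB.map (fun q => q.headD "")) prev depth far).2.1.keys.Nodup ∧
      (∀ q ∈ (pvInnerB callers p qB vis fp).1,
        GoodP (pvInnerA (p.headD "") callers (qB.map (fun q => q.headD "")) prev depth far).2.1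
              (pvInnerA (p.headD "") callers (qB.map (fun q => q.headD "")) prev depth far).2.2.1 t q) ∧
      GoodP (pvInnerA (p.headD "") callers (qB.map (fun q => q.headD "")) prev depth far).2.1
            (pvInnerA (p.headD "") callers (qB.map (fun q => q.headD "")) prev depth far).2.2.1 t
            (pvInnerB callers p qB vis fp).2.2 ∧
      (pvInnerA (p.headD "") callers (qB.map (fun q => q.headD "")) prev depth far).2.2.2
          = (pvInnerB callers p qB vis fp).2.2.headD "" ∧
      (∀ s, (pvInnerB callers p qB vis fp).2.1.contains s
          = ((pvInnerA (p.headD "") callers (qB.map (fun q => q.headD "")) prev depth far).2.1.get? s).isSome) := by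
  intro callers
  induction callers with
  | nil =>
    intro p qB prev depth vis far fp h1 h2 h3 h4 h5 h6
    exact ⟨rfl, h1, fun q hq => h2 q hq, h3, h4, fun s => h5 s⟩
  | cons c rest ih =>
    intro p qB prev depth vis far fp h1 h2 h3 h4 h5 h6
    by_cases hvc : (prev.get? c).isSome
    · -- caller already seen: both sides skip
      have hbv : PySem.Set.contains vis c = true := by rw [h5 c]; exact hvc
      simp only [pvInnerA, pvInnerB, hvc, hbv, if_pos]
      exact ih p qB prev depth vis far fp h1 h2 h3 h4 h5 h6
    · -- fresh caller
      have hcn : prev.get? c = none := by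
        cases hget : prev.get? c with
        | none => rfl
        | some v => rw [hget] at hvc; simp at hvc
      have hbv : PySem.Set.contains vis c = false := by rw [h5 c, hcn]; rfl
      -- p is nonempty; name its head
      obtain ⟨hchain_p, hnd_p, hdep_p⟩ := h6
      cases p with
      | nil => cases hchain_p
      | cons hd tl =>
      obtain ⟨hchain_fp, hnd_fp, hdep_fp⟩ := h3
      cases fp with
      | nil => cases hchain_fp
      | cons fh ft =>
      simp only [List.headD_cons] at h4 hdep_p hdep_fp ⊢
      -- facts about memberships
      have ht_some : (prev.get? t).isSome :=
        chainP_mem_isSome hchain_fp t (chainP_target_mem hchain_fp)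
      have hct : c ≠ t := by intro hEq; rw [← hEq, hcn] at ht_some; cases ht_some
      have hfh_some : (prev.get? fh).isSome :=
        chainP_mem_isSome hchain_fp fh (by simp)
      have hcfh : fh ≠ c := by intro hEq; rw [hEq, hcn] at hfh_some; cases hfh_some
      have hhd_some : (prev.get? hd).isSome :=
        chainP_mem_isSome hchain_p hd (by simp)
      have hchd : hd ≠ c := by intro hEq; rw [hEq, hcn] at hhd_some; cases hhd_some
      -- the new maps
      set prev' := prev.insert c (some hd) with hprev'
      set dnew : Int := depth.getD hd 0 + 1 with hdnew
      set depth' := depth.insert c dnew with hdepth'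
      have hkeys' : prev'.keys.Nodup := PySem.Dict.nodup_keys_insert prev c (some hd) h1
      have hdval : depth.getD hd 0 = ((hd :: tl).length : Int) - 1 :=
        PySem.Dict.getD_of_get?_eq_some depth 0 hdep_p
      -- GoodP transported along the two inserts, for any path whose nodes are old
      have hGood' : ∀ q : List String, GoodP prev depth t q → GoodP prev' depth' t q := by
        intro q hq
        obtain ⟨hc, hn, hdp⟩ := hq
        refine ⟨chainP_insert hcn hc, hn, ?_⟩
        cases q with
        | nil => cases hc
        | cons qh qt =>
          have hq_some : (prev.get? qh).isSome := chainP_mem_isSome hc qh (by simp)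
          have : qh ≠ c := by intro hEq; rw [hEq, hcn] at hq_some; cases hq_some
          simp only [List.headD_cons] at hdp ⊢
          rw [hdepth', PySem.Dict.get?_insert_of_ne depth dnew this]
          exact hdp
      -- GoodP of the new path np = c :: hd :: tl
      have hGood_np : GoodP prev' depth' t (c :: hd :: tl) := by
        refine ⟨⟨hct, ?_, chainP_insert hcn hchain_p⟩, ?_, ?_⟩
        · rw [hprev', PySem.Dict.get?_insert_self]
        · refine List.Nodup.cons ?_ hnd_p
          intro hmem
          have := chainP_mem_isSome hchain_p c hmem
          rw [hcn] at this; cases this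
        · simp only [List.headD_cons]
          rw [hdepth', PySem.Dict.get?_insert_self, hdnew, hdval]
          simp only [List.length_cons]
          push_cast
          ring_nf
      -- depth' lookups for the farthest comparison
      have hdc : depth'.getD c 0 = ((hd :: tl).length : Int) :=
        by rw [hdepth', PySem.Dict.getD_insert_self, hdnew, hdval]; ring
      have hdf : depth'.getD far 0 = ((fh :: ft).length : Int) - 1 := by
        rw [hdepth', h4, PySem.Dict.getD_insert_of_ne depth dnew 0 hcfh]
        exact PySem.Dict.getD_of_get?_eq_some depth 0 hdep_fp
      -- reduce one step of both loops
      simp only [pvInnerA, pvInnerB, hvc, hbv, Bool.false_eq_true, if_false]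
      rw [show (depth.insert c (depth.getD hd 0 + 1)) = depth' by rw [hdepth', hdnew]]
      rw [show (prev.insert c (some hd)) = prev' by rw [hprev']]
      -- align the two farthest/fp updates
      have hfar_eq :
          (if depth'.getD c 0 > depth'.getD far 0 then c else far)
            = (if (c :: hd :: tl).length > (fh :: ft).length then (c :: hd :: tl) else (fh :: ft)).headD "" := by
        rw [hdc, hdf]
        by_cases hlen : (c :: hd :: tl).length > (fh :: ft).length
        · rw [if_pos (by simp at hlen ⊢; omega), if_pos hlen]; simp
        · rw [if_neg (by simp at hlen ⊢; omega), if_neg hlen]; simp [h4]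
      have hGood_fp' : GoodP prev' depth' t
          (if (c :: hd :: tl).length > (fh :: ft).length then (c :: hd :: tl) else (fh :: ft)) := by
        by_cases hlen : (c :: hd :: tl).length > (fh :: ft).length
        · rw [if_pos hlen]; exact hGood_np
        · rw [if_neg hlen]; exact hGood' _ ⟨hchain_fp, hnd_fp, hdep_fp⟩
      have hvis' : ∀ s, (PySem.Set.add vis c).contains s = (prev'.get? s).isSome := by
        intro s
        by_cases hsc : s = c
        · subst hsc
          rw [hprev', PySem.Dict.get?_insert_self]
          simp [PySem.Set.contains_eq_listContains, List.contains_eq_mem, PySem.Set.mem_add]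
        · rw [hprev', PySem.Dict.get?_insert_of_ne prev (some hd) hsc, ← h5 s]
          simp [PySem.Set.contains_eq_listContains, List.contains_eq_mem, PySem.Set.mem_add, hsc]
      have happly := ih (hd :: tl) (qB ++ [c :: hd :: tl]) prev' depth'
        (PySem.Set.add vis c)
        (if depth'.getD c 0 > depth'.getD far 0 then c else far)
        (if (c :: hd :: tl).length > (fh :: ft).length then (c :: hd :: tl) else (fh :: ft))
        hkeys'
        (by
          intro q hq
          rcases List.mem_append.mp hq with hq | hq
          · exact hGood' q (h2 q hq)
          · simp at hq; subst hq; exact hGood_np)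
        hGood_fp' hfar_eq hvis'
        (hGood' _ ⟨hchain_p, hnd_p, hdep_p⟩)
      simpa only [List.map_append, List.map_cons, List.map_nil, List.headD_cons] using happly

lemma loop_sim (rcg : List (String × List String)) (roots : List String) (t : String) :
    ∀ (fuel : Nat) (qB : List (List String)) (prev : PySem.Dict String (Option String))
      (depth : PySem.Dict String Int) (vis : PySem.Set String) (far : String) (fp : List String),
      prev.keys.Nodup →
      (∀ p ∈ qB, GoodP prev depth t p) →
      GoodP prev depth t fp →
      far = fp.headD "" →
      (∀ s, vis.contains s = (prev.get? s).isSome) →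
      pvLoopA rcg t roots fuel (qB.map (fun q => q.headD "")) prev depth far
        = pvLoopB rcg roots fuel qB vis fp := by
  intro fuel
  induction fuel with
  | zero =>
    intro qB prev depth vis far fp h1 _ h3 h4 _
    simp only [pvLoopA, pvLoopB]
    exact finish_eq h3 h4
  | succ n ih =>
    intro qB prev depth vis far fp h1 h2 h3 h4 h5
    cases qB with
    | nil =>
      simp only [List.map_nil, pvLoopA, pvLoopB]
      exact finish_eq h3 h4
    | cons p qs =>
      have hGp := h2 p (by simp)
      obtain ⟨hchain_p, hnd_p, hdep_p⟩ := hGp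
      cases p with
      | nil => cases hchain_p
      | cons hd tl =>
      simp only [List.map_cons, pvLoopA, pvLoopB, List.headD_cons]
      by_cases hroot : roots.contains hd
      · rw [if_pos hroot, if_pos hroot]
        have hlen : tl.length ≤ prev.size := by
          have := chainP_length_le_size hchain_p hnd_p
          simp at this; omega
        rw [rebuild_of_chainP hchain_p prev.size hlen [hd]]
        simp
      · rw [if_neg hroot, if_neg hroot]
        have hinner := inner_sim t (pvCgGet rcg hd) (hd :: tl) qs prev depth vis far fp
          h1 (fun q hq => h2 q (List.mem_cons_of_mem _ hq)) h3 h4 h5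
          ⟨hchain_p, hnd_p, hdep_p⟩
        simp only [List.headD_cons] at hinner
        obtain ⟨e1, e2, e3, e4, e5, e6⟩ := hinner
        rw [show (pvInnerA hd (pvCgGet rcg hd) (List.map (fun q => q.headD "") qs) prev depth far).1
              = List.map (fun q => q.headD "") (pvInnerB (pvCgGet rcg hd) (hd :: tl) qs vis fp).1 from e1]
        exact ih _ _ _ _ _ _ e2 e3 e4 e5 e6

-- ===== VERDICT (by name: the statement is the Claim_ definition above) =====
theorem find_call_chain_to_target_spec : Claim_equal_find_call_chain_to_target := by
  intro rcg t pr _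
  unfold Spec_find_call_chain_to_target find_call_chain_to_target find_call_chain_to_target_alt
  have h := loop_sim rcg (pr.getD ["main"]) t (1 + (rcg.map (fun p => p.2.length)).sum)
    [[t]]
    ((PySem.Dict.empty : PySem.Dict String (Option String)).insert t none)
    ((PySem.Dict.empty : PySem.Dict String Int).insert t 0)
    (PySem.Set.ofList [t]) t [t]
    ?_ ?_ ?_ rfl ?_
  · simpa using h
  · exact PySem.Dict.nodup_keys_insert _ t none (by simp)
  · intro p hp
    simp only [List.mem_singleton] at hp
    subst hp
    refine ⟨⟨rfl, PySem.Dict.get?_insert_self _ t none⟩, by simp, ?_⟩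
    simp only [List.headD_cons, List.length_cons, List.length_nil]
    rw [PySem.Dict.get?_insert_self]
    norm_num
  · refine ⟨⟨rfl, PySem.Dict.get?_insert_self _ t none⟩, by simp, ?_⟩
    simp only [List.headD_cons, List.length_cons, List.length_nil]
    rw [PySem.Dict.get?_insert_self]
    norm_num
  · intro s
    by_cases hs : s = t
    · subst hs
      rw [PySem.Dict.get?_insert_self]
      simp [PySem.Set.contains_eq_listContains, List.contains_eq_mem, PySem.Set.mem_ofList]
    · rw [PySem.Dict.get?_insert_of_ne _ none hs, PySem.Dict.get?_empty]
      simp [PySem.Set.contains_eq_listContains, List.contains_eq_mem, PySem.Set.mem_ofList, hs]
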